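-- pv_equiv track=rewrite | github.com/AlexGaiser/dict_functs | Anagram maker/anagram_maker.py | isogram_finder
-- ===== SOURCE A (Python) =====
-- def isogram_finder(wordlist):
--     wordlist = list(map(str.lower, wordlist))
--     isogram = True
--     isogramlist = []
--     for word in wordlist:
--         isogram = True
--         for char in word:
--             if word.count(char) > 1:
--                 isogram = False
--                 break
--         if isogram == True:
--             isogramlist.append(word)
--     return isogramlist
-- ===== SOURCE B (Python) =====
-- def isogram_finder(wordlist):
--     isogramlist = []
--     for word in wordlist:
--         w = word.lower()
--         cs = sorted(w)
--         ok = True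
--         for i in range(len(cs) - 1):
--             if cs[i] == cs[i + 1]:
--                 ok = False
--                 break
--         if ok:
--             isogramlist.append(w)
--     return isogramlist
-- ===== Notes on version B (the rewrite author's own statement) =====
-- stated objective: alternative
-- what changed: Duplicate detection per word is done by sorting the characters and making one adjacent-equality scan instead of calling word.count(char) for every character (a repeated full scan).
import Mathlib
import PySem

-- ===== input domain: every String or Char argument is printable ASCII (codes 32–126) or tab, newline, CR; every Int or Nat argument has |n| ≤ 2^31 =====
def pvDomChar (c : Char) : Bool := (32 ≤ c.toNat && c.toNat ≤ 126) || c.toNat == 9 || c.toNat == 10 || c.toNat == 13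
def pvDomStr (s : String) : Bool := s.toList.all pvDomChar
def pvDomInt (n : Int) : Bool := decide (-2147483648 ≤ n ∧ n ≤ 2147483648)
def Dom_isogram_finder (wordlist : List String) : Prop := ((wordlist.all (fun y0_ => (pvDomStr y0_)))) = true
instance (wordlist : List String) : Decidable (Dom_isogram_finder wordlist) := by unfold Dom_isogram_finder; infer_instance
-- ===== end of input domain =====

-- B sorts each word's characters and makes one adjacent-equality scan instead of A's
-- per-character word.count scan; same return value, different duplicate detection.

-- ===== PORT A =====
-- inner 'for char in word: if word.count(char) > 1: isogram = False; break'
def pvLoopA (word : List Char) : List Char → Bool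
  | [] => true
  | c :: rest => if word.count c > 1 then false else pvLoopA word rest

def isogram_finder (wordlist : List String) : List String :=
  let wordlist := wordlist.map PySem.Str.lower
  wordlist.foldl (fun acc word =>
    if pvLoopA word.toList word.toList then acc ++ [word] else acc) []

-- ===== PORT B =====
-- 'for i in range(len(cs)-1): if cs[i] == cs[i+1]: ok = False; break'
def pvAdjScan : List Char → Bool
  | [] => true
  | [_] => true
  | a :: b :: rest => if a == b then false else pvAdjScan (b :: rest)

def isogram_finder_alt (wordlist : List String) : List String :=
  wordlist.foldl (fun acc word =>
    let w := PySem.Str.lower word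
    let cs := PySem.List.sorted w.toList (fun x => x) false
    if pvAdjScan cs then acc ++ [w] else acc) []

-- ===== PRECONDITION & SPEC =====
def Spec_isogram_finder (wordlist : List String) (out : List String) : Prop := out = isogram_finder_alt wordlist
instance (wordlist : List String) (out : List String) : Decidable (Spec_isogram_finder wordlist out) := by unfold Spec_isogram_finder; infer_instance

-- ===== CLAIM (what is proved, stated in full; the proofs are below) =====
def Claim_equal_isogram_finder : Prop := ∀ (wordlist : List String), Dom_isogram_finder wordlist → Spec_isogram_finder wordlist (isogram_finder wordlist)

-- ===== LEMMAS AND PROOFS =====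

lemma pvLoopA_eq_all (word l : List Char) :
    pvLoopA word l = l.all (fun c => !(decide (word.count c > 1))) := by
  induction l with
  | nil => rfl
  | cons c rest ih =>
    simp only [pvLoopA, List.all_cons, ih]
    by_cases h : word.count c > 1 <;> simp [h]

lemma pvLoopA_self_iff (w : List Char) : pvLoopA w w = true ↔ w.Nodup := by
  rw [pvLoopA_eq_all, List.nodup_iff_count_le_one]
  simp only [List.all_eq_true, Bool.not_eq_eq_eq_not, Bool.not_true, decide_eq_false_iff_not,
    not_lt]
  constructor
  · intro h a
    by_cases ha : a ∈ w
    · exact h a ha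
    · simp [List.count_eq_zero_of_not_mem ha]
  · intro h a _; exact h a

lemma pvAdjScan_iff_nodup (s : List Char) (hp : s.Pairwise (· ≤ ·)) :
    pvAdjScan s = true ↔ s.Nodup := by
  induction s with
  | nil => simp [pvAdjScan]
  | cons a t ih =>
    cases t with
    | nil => simp [pvAdjScan]
    | cons b u =>
      have hp' : (b :: u).Pairwise (· ≤ ·) := hp.tail
      by_cases hab : a = b
      · subst hab
        simp [pvAdjScan, List.nodup_cons]
      · have hab' : (a == b) = false := by simp [hab]
        have halt : a < b := lt_of_le_of_ne (List.rel_of_pairwise_cons hp (List.mem_cons_self)) hab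
        have hnotmem : a ∉ b :: u := by
          intro hmem
          rcases List.mem_cons.mp hmem with h | h
          · exact hab h
          · exact lt_irrefl a (halt.trans_le (List.rel_of_pairwise_cons hp' h))
        rw [show pvAdjScan (a :: b :: u) = pvAdjScan (b :: u) by simp [pvAdjScan, hab'],
          ih hp', List.nodup_cons]
        simp [hnotmem]

lemma pvCond_eq (w : List Char) :
    pvLoopA w w = pvAdjScan (PySem.List.sorted w (fun x => x) false) := by
  have hperm : (PySem.List.sorted w (fun x => x) false).Perm w := PySem.List.sorted_perm ..
  have h1 := pvLoopA_self_iff w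
  have h2 := (pvAdjScan_iff_nodup _ (PySem.List.sorted_pairwise ..)).trans hperm.nodup_iff
  rw [Bool.eq_iff_iff, h1, h2]

-- ===== VERDICT (by name: the statement is the Claim_ definition above) =====
theorem isogram_finder_spec : Claim_equal_isogram_finder := by
  intro wordlist _
  unfold Spec_isogram_finder isogram_finder isogram_finder_alt
  rw [List.foldl_map]
  simp only [pvCond_eq]
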